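-- pv_equiv track=rewrite | github.com/DarkBloomer/Advent | Day5/AdventDay5/stack.py | createCols
-- ===== SOURCE A (Python) =====
-- def createCols(board):
-- 	myCols = {}
-- 	cnt = 1
-- 	for x in range(len(board[0])):
-- 		col = []
-- 		for b in board:
-- 			col.append(b[x])
-- 			if '*' in col:
-- 				col.remove('*')
-- 		myCols[cnt] = col
-- 		cnt += 1
-- 	return myCols
-- ===== SOURCE B (Python) =====
-- def createCols(board):
--     cols = zip(*board)
--     return {i: [c for c in col if c != '*'] for i, col in enumerate(cols, start=1)}
-- ===== Notes on version B (the rewrite author's own statement) =====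
-- stated objective: faster
-- what changed: Replaces A's column-major nested loops, which rescan the growing column with "'*' in col" and remove() after every append (O(rows^2) per column), by a single zip(*board) transpose plus a dict comprehension filtering '*' from each column.
import Mathlib
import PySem

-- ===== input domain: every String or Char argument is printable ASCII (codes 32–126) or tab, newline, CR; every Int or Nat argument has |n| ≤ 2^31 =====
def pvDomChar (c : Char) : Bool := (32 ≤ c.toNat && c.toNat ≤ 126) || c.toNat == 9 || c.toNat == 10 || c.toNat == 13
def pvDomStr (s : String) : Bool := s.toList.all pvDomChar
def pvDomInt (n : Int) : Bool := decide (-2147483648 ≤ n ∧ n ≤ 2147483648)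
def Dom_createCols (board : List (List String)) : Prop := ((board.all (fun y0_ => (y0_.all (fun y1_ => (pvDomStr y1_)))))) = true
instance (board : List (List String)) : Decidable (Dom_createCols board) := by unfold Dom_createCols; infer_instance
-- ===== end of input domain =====

-- B replaces A's column-major nested loops (with a '*'-membership scan and remove after every
-- append) by a zip(*board) transpose and a dict comprehension filtering '*' from each column.

-- ===== PORT A =====
def createCols (board : List (List String)) : List (Int × List String) :=
  let n := ((PySem.List.pyGet? board 0).getD []).length
  let st := (PySem.List.pyRange 0 (n : Int) 1).foldl
    (fun (st : PySem.Dict Int (List String) × Int) x =>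
      let col := board.foldl
        (fun col b =>
          let col := col ++ [PySem.List.pyGetD b x ""]
          if col.contains "*" then (PySem.List.remove? col "*").getD col else col) []
      (st.1.insert st.2 col, st.2 + 1))
    (PySem.Dict.empty, 1)
  st.1.items

-- ===== PORT B =====
-- zip(*board): rows of the transpose, truncated at the shortest row (zip() of no lists = [])
def pyZipAll (ls : List (List String)) : List (List String) :=
  if h : ls = [] ∨ ls.any (·.isEmpty) then []
  else (ls.map (fun l => l.headD "")) :: pyZipAll (ls.map (·.tail))
termination_by (ls.headD []).length
decreasing_by
  obtain ⟨h1, h2⟩ := not_or.mp h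
  cases ls with
  | nil => exact absurd rfl h1
  | cons a t =>
      cases a with
      | nil => exact absurd (by simp) h2
      | cons c cs => simp

def createCols_alt (board : List (List String)) : List (Int × List String) :=
  let cols := pyZipAll board
  ((PySem.List.enumerate cols 1).foldl
    (fun (d : PySem.Dict Int (List String)) p =>
      d.insert p.1 (p.2.filter (fun c => !(c == "*")))) PySem.Dict.empty).items

-- ===== PRECONDITION & SPEC =====
-- Pre_ excludes exactly the inputs where A raises IndexError: the empty board (board[0]) and
-- boards with a row shorter than the first row (b[x]).
def Pre_createCols (board : List (List String)) : Prop :=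
  board ≠ [] ∧ ∀ r ∈ board, (board.headD []).length ≤ r.length
instance (board : List (List String)) : Decidable (Pre_createCols board) := by unfold Pre_createCols; infer_instance
def pvWitness_createCols : List (List String) := [["a", "*"], ["b", "c"]]

def Spec_createCols (board : List (List String)) (out : List (Int × List String)) : Prop := out = createCols_alt board
instance (board : List (List String)) (out : List (Int × List String)) : Decidable (Spec_createCols board out) := by unfold Spec_createCols; infer_instance

-- ===== CLAIM (what is proved, stated in full; the proofs are below) =====
def Claim_equal_createCols : Prop := ∀ (board : List (List String)), Dom_createCols board → Pre_createCols board → Spec_createCols board (createCols board)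
-- ===== LEMMAS AND PROOFS =====

-- the filtered j-th column, and the canonical result both programs compute
def pvCol (board : List (List String)) (j : Nat) : List String :=
  (board.map (fun b => PySem.List.pyGetD b (j : Int) "")).filter (fun c => !(c == "*"))

def pvCanon (board : List (List String)) (n : Nat) : List (Int × List String) :=
  (List.range n).map (fun (j : Nat) => ((j : Int) + 1, pvCol board j))

-- A's inner loop: append-then-remove never keeps a '*'
theorem pvInnerA (x : Int) (bs : List (List String)) (col : List String) (h : "*" ∉ col) :
    bs.foldl
      (fun col b =>
        let col := col ++ [PySem.List.pyGetD b x ""]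
        if col.contains "*" then (PySem.List.remove? col "*").getD col else col) col
    = col ++ (bs.map (fun b => PySem.List.pyGetD b x "")).filter (fun c => !(c == "*")) := by
  induction bs generalizing col with
  | nil => simp
  | cons b bs ih =>
      simp only [List.foldl_cons, List.map_cons, List.filter_cons]
      by_cases hv : PySem.List.pyGetD b x "" = "*"
      · have hc : (col ++ [PySem.List.pyGetD b x ""]).contains "*" = true := by
          simp [hv, List.contains_eq_mem]
        rw [hc]
        simp only [if_true]
        have hrem : PySem.List.remove? (col ++ [PySem.List.pyGetD b x ""]) "*" = some col := by
          rw [PySem.List.remove?_eq_some_erase _ _ (by simp [hv])]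
          rw [hv, List.erase_append_right _ h]
          simp
        rw [hrem]
        simp only [Option.getD_some]
        rw [ih col h]
        simp [hv]
      · have hc : (col ++ [PySem.List.pyGetD b x ""]).contains "*" = false := by
          simp [List.contains_eq_mem, hv]
          constructor
          · exact h
          · exact fun e => hv e.symm
        simp only [hc, Bool.false_eq_true, if_false]
        rw [ih (col ++ [PySem.List.pyGetD b x ""]) (by simp [h]; exact fun e => hv e.symm)]
        simp [hv]

theorem pvOuterA (board : List (List String)) (n : Nat) :
    (((PySem.List.pyRange 0 (n : Int) 1).foldl
      (fun (st : PySem.Dict Int (List String) × Int) x =>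
        let col := board.foldl
          (fun col b =>
            let col := col ++ [PySem.List.pyGetD b x ""]
            if col.contains "*" then (PySem.List.remove? col "*").getD col else col) []
        (st.1.insert st.2 col, st.2 + 1))
      (PySem.Dict.empty, 1)).1.items
      = pvCanon board n)
    ∧ (((PySem.List.pyRange 0 (n : Int) 1).foldl
      (fun (st : PySem.Dict Int (List String) × Int) x =>
        let col := board.foldl
          (fun col b =>
            let col := col ++ [PySem.List.pyGetD b x ""]
            if col.contains "*" then (PySem.List.remove? col "*").getD col else col) []
        (st.1.insert st.2 col, st.2 + 1))
      (PySem.Dict.empty, 1)).2 = (n : Int) + 1) := by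
  induction n with
  | zero =>
      constructor <;> simp [PySem.List.pyRange, pvCanon, PySem.Dict.empty]
  | succ n ih =>
      have hrange : PySem.List.pyRange 0 ((n + 1 : Nat) : Int) 1
          = PySem.List.pyRange 0 (n : Int) 1 ++ [(n : Int)] := by
        push_cast
        exact PySem.List.pyRange_one_succ_right (by positivity)
      rw [hrange, List.foldl_append]
      obtain ⟨h1, h2⟩ := ih
      simp only [List.foldl_cons, List.foldl_nil]
      rw [pvInnerA (n : Int) board [] (by simp)]
      have hfresh : (((PySem.List.pyRange 0 (n : Int) 1).foldl
          (fun (st : PySem.Dict Int (List String) × Int) x =>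
            let col := board.foldl
              (fun col b =>
                let col := col ++ [PySem.List.pyGetD b x ""]
                if col.contains "*" then (PySem.List.remove? col "*").getD col else col) []
            (st.1.insert st.2 col, st.2 + 1))
          (PySem.Dict.empty, 1)).1).contains ((n : Int) + 1) = false := by
        rw [← Bool.not_eq_true, PySem.Dict.contains_iff_mem_keys]
        simp only [PySem.Dict.keys, h1, pvCanon, List.map_map]
        intro hmem
        simp only [List.mem_map, List.mem_range, Function.comp] at hmem
        obtain ⟨j, hj, hje⟩ := hmem
        omega
      constructor
      · rw [h2, PySem.Dict.items_insert_of_not_contains _ _ hfresh, h1]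
        simp [pvCanon, List.range_succ, pvCol]
      · simp only [h2]
        push_cast
        ring

theorem pvZipAll_eq (n : Nat) (ls : List (List String)) (hne : ls ≠ [])
    (hh : (ls.headD []).length = n) (hall : ∀ l ∈ ls, n ≤ l.length) :
    pyZipAll ls = (List.range n).map (fun (j : Nat) => ls.map (fun l => PySem.List.pyGetD l (j : Int) "")) := by
  induction n generalizing ls with
  | zero =>
      rw [pyZipAll]
      have : ls.any (·.isEmpty) = true := by
        cases ls with
        | nil => exact absurd rfl hne
        | cons a t =>
            simp only [List.headD_cons] at hh
            simp [List.any_cons, List.eq_nil_of_length_eq_zero hh]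
      simp [this]
  | succ n ih =>
      have hcond : ¬ (ls = [] ∨ ls.any (·.isEmpty) = true) := by
        rintro (h | h)
        · exact hne h
        · simp only [List.any_eq_true] at h
          obtain ⟨l, hl, he⟩ := h
          have := hall l hl
          simp [List.isEmpty_iff] at he
          simp [he] at this
      rw [pyZipAll]
      rw [dif_neg (by simpa using hcond)]
      have htne : ls.map (·.tail) ≠ [] := by simpa using hne
      have hth : ((ls.map (·.tail)).headD []).length = n := by
        cases ls with
        | nil => exact absurd rfl hne
        | cons a t =>
            simp only [List.map_cons, List.headD_cons, List.length_tail]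
            simp only [List.headD_cons] at hh
            omega
      have htall : ∀ l ∈ ls.map (·.tail), n ≤ l.length := by
        intro l hl
        simp only [List.mem_map] at hl
        obtain ⟨l', hl', rfl⟩ := hl
        have := hall l' hl'
        simp [List.length_tail]
        omega
      rw [ih (ls.map (·.tail)) htne hth htall]
      rw [List.range_succ_eq_map]
      simp only [List.map_cons, List.map_map]
      refine congrArg₂ List.cons ?_ ?_
      · -- heads
        apply List.map_congr_left
        intro l hl
        have h1 : 1 ≤ l.length := by have := hall l hl; omega
        cases l with
        | nil => simp at h1
        | cons c cs => simp [PySem.List.pyGetD]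
      · -- tails
        apply List.map_congr_left
        intro j hj
        simp only [List.mem_range] at hj
        apply List.map_congr_left
        intro l hl
        simp only [Function.comp]
        rw [PySem.List.pyGetD_natCast, PySem.List.pyGetD_natCast]
        simp [List.getD_eq_getElem?_getD, List.getElem?_tail]

theorem pvEnumMapRange (n : Nat) (f : Nat → List String) (s : Int) :
    PySem.List.enumerate ((List.range n).map f) s = (List.range n).map (fun (j : Nat) => (s + (j : Int), f j)) := by
  induction n with
  | zero => simp [PySem.List.enumerate]
  | succ n ih =>
      rw [List.range_succ, List.map_append, PySem.List.enumerate_append, ih, List.map_append]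
      simp [PySem.List.enumerate_cons]

theorem pvFoldB (l : List (Int × List String)) (hk : (l.map (·.1)).Nodup) :
    (l.foldl (fun (d : PySem.Dict Int (List String)) p =>
        d.insert p.1 (p.2.filter (fun c => !(c == "*")))) PySem.Dict.empty).items
    = l.map (fun p => (p.1, p.2.filter (fun c => !(c == "*")))) := by
  have h := PySem.Dict.items_foldl_insert_fresh l (fun p => p.1)
    (fun p => p.2.filter (fun c => !(c == "*"))) PySem.Dict.empty (by intro a _; simp [PySem.Dict.empty, PySem.Dict.contains]) hk
  simpa [PySem.Dict.empty, PySem.Dict.items] using h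


-- ===== VERDICT (by name: the statement is the Claim_ definition above) =====
theorem createCols_spec : Claim_equal_createCols := by
  intro board _ hpre
  obtain ⟨hne, hall⟩ := hpre
  unfold Spec_createCols createCols createCols_alt
  have hget : ((PySem.List.pyGet? board 0).getD []) = board.headD [] := by
    cases board with
    | nil => exact absurd rfl hne
    | cons a t => simp [PySem.List.pyGet?, PySem.List.pyIdx?]
  simp only [hget]
  rw [(pvOuterA board (board.headD []).length).1]
  rw [pvZipAll_eq (board.headD []).length board hne rfl hall]
  rw [pvEnumMapRange (board.headD []).length (fun j => board.map (fun l => PySem.List.pyGetD l (j : Int) "")) 1]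
  rw [pvFoldB _ (by
    simp only [List.map_map]
    refine List.Nodup.map ?_ (List.nodup_range)
    intro a b hab
    simp only [Function.comp] at hab
    omega)]
  simp only [List.map_map, pvCanon]
  apply List.map_congr_left
  intro j hj
  simp only [Function.comp, pvCol]
  refine Prod.ext ?_ rfl
  simp
  ring
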